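-- pv_equiv track=rewrite | github.com/allen-proxmire/twin-primes-offsets | 7offsets_all primes found and unique.py | analyze_offsets
-- ===== SOURCE A (Python) =====
-- def is_prime(n):
--     """
--     Checks if a number is prime using an efficient trial division method.
--     It returns True if n is prime, otherwise False.
--     """
--     if n <= 1:
--         return False
--     if n <= 3:
--         return True
--     if n % 2 == 0 or n % 3 == 0:
--         return False
--     i = 5
--     while i * i <= n:
--         if n % i == 0 or n % (i + 2) == 0:
--             return False
--         i += 6
--     return True
--
-- def analyze_offsets(p_values, offsets):
--     """
--     Applies a list of offsets to a list of p-values, checks for primality,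
--     and returns two lists: one with all primes (including duplicates) and one with only unique primes.
--     """
--     all_primes_list = []
--
--     for p in p_values:
--         for offset in offsets:
--             q = 2 * p + offset
--             if is_prime(q):
--                 all_primes_list.append(q)
--
--     # Create a list of unique primes from the full list
--     unique_primes_list = sorted(list(set(all_primes_list)))
--
--     return all_primes_list, unique_primes_list
-- ===== SOURCE B (Python) =====
-- def analyze_offsets(p_values, offsets):
--     """
--     Same result via a Sieve of Eratosthenes: build the flat candidate list,
--     sieve the primes up to sqrt(max candidate) once, and test each candidate
--     by dividing only by those sieved primes.
--     """
--     qs = [2 * p + offset for p in p_values for offset in offsets]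
--     m = 1
--     for q in qs:
--         if q > m:
--             m = q
--     limit = 1
--     while (limit + 1) * (limit + 1) <= m:
--         limit += 1
--     sieve = [True] * (limit + 1)
--     for i in range(2, limit + 1):
--         for j in range(2 * i, limit + 1, i):
--             sieve[j] = False
--     primes = [i for i in range(2, limit + 1) if sieve[i]]
--     all_primes_list = [q for q in qs
--                        if q >= 2 and all(q % p != 0 for p in primes if p * p <= q)]
--     unique_primes_list = sorted(set(all_primes_list))
--     return all_primes_list, unique_primes_list
-- ===== Notes on version B (the rewrite author's own statement) =====
-- stated objective: alternative
-- what changed: B replaces A's per-candidate 6k±1 wheel trial division with a different algorithm: it flattens the candidates, computes their maximum, runs one Sieve of Eratosthenes up to sqrt(max) to tabulate the primes, and then tests each candidate by dividing only by those precomputed primes.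
import Mathlib
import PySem

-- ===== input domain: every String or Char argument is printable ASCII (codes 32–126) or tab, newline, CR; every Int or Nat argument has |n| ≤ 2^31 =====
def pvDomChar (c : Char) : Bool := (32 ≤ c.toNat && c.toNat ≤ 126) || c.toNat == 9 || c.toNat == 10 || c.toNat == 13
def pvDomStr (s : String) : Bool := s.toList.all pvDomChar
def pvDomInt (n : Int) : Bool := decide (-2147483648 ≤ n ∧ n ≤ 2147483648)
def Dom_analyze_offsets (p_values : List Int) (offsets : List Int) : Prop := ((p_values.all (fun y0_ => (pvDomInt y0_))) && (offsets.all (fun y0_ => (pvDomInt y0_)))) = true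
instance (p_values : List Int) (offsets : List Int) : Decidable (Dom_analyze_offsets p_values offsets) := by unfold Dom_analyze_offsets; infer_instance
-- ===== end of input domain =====

-- B replaces A's per-candidate 6k±1-wheel trial division by a Sieve of Eratosthenes up to
-- sqrt(max candidate), testing each candidate by dividing only by the sieved primes (alternative algorithm).


-- ===== PORT A =====
-- the 'while i * i <= n: … i += 6' loop of is_prime
def is_prime_loop (n i : Int) : Bool :=
  if i * i ≤ n then
    if PySem.Int.mod n i = 0 ∨ PySem.Int.mod n (i + 2) = 0 then false
    else is_prime_loop n (i + 6)
  else true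
termination_by (n + 1 - i).toNat
decreasing_by
  have h1 : i ≤ i * i := by nlinarith [mul_self_nonneg (2 * i - 1)]
  omega

def is_prime (n : Int) : Bool :=
  if n ≤ 1 then false
  else if n ≤ 3 then true
  else if PySem.Int.mod n 2 = 0 ∨ PySem.Int.mod n 3 = 0 then false
  else is_prime_loop n 5

def analyze_offsets (p_values : List Int) (offsets : List Int) : List Int × List Int :=
  let all_primes_list :=
    p_values.foldl (fun acc p =>
      offsets.foldl (fun acc2 offset =>
        let q := 2 * p + offset
        if is_prime q then acc2 ++ [q] else acc2) acc) []
  let unique_primes_list :=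
    PySem.List.sorted (PySem.Set.ofList all_primes_list) (fun x => x) false
  (all_primes_list, unique_primes_list)

-- ===== PORT B =====
-- the 'm = 1; for q in qs: if q > m: m = q' loop
def py_max (qs : List Int) : Int := qs.foldl (fun m q => if m < q then q else m) 1

-- the 'while (limit + 1) * (limit + 1) <= m: limit += 1' loop
def sqrt_loop (m limit : Int) : Int :=
  if (limit + 1) * (limit + 1) ≤ m then sqrt_loop m (limit + 1) else limit
termination_by (m - limit).toNat
decreasing_by
  have h : limit < m := by nlinarith [sq_nonneg (limit + 1)]
  omega

-- 'sieve = [True]*(limit+1); for i in range(2, limit+1): for j in range(2*i, limit+1, i): sieve[j] = False'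
def build_sieve (limit : Int) : Array Bool :=
  (PySem.List.pyRange 2 (limit + 1) 1).foldl
    (fun s i => (PySem.List.pyRange (2 * i) (limit + 1) i).foldl
      (fun s j => s.setIfInBounds j.toNat false) s)
    (Array.replicate (limit.toNat + 1) true)

def analyze_offsets_alt (p_values : List Int) (offsets : List Int) : List Int × List Int :=
  let qs := p_values.flatMap (fun p => offsets.map (fun offset => 2 * p + offset))
  let m := py_max qs
  let limit := sqrt_loop m 1
  let sieve := build_sieve limit
  let primes := (PySem.List.pyRange 2 (limit + 1) 1).filter (fun i => sieve.getD i.toNat false)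
  let all_primes_list := qs.filter (fun q =>
    decide (2 ≤ q) && primes.all (fun p => !decide (p * p ≤ q) || decide (PySem.Int.mod q p ≠ 0)))
  let unique_primes_list :=
    PySem.List.sorted (PySem.Set.ofList all_primes_list) (fun x => x) false
  (all_primes_list, unique_primes_list)

-- ===== PRECONDITION & SPEC =====
def Spec_analyze_offsets (p_values : List Int) (offsets : List Int) (out : List Int × List Int) : Prop := out = analyze_offsets_alt p_values offsets
instance (p_values : List Int) (offsets : List Int) (out : List Int × List Int) : Decidable (Spec_analyze_offsets p_values offsets out) := by unfold Spec_analyze_offsets; infer_instance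

-- ===== CLAIM (what is proved, stated in full; the proofs are below) =====
def Claim_equal_analyze_offsets : Prop := ∀ (p_values : List Int) (offsets : List Int), Dom_analyze_offsets p_values offsets → Spec_analyze_offsets p_values offsets (analyze_offsets p_values offsets)

-- ===== LEMMAS AND PROOFS =====

-- if A's wheel loop returns true, no wheel value (≡ 1 or 5 mod 6) up to √n divides n
theorem is_prime_loop_no_wheel (n i : Int) : 5 ≤ i → i % 6 = 5 → is_prime_loop n i = true →
    ∀ d, i ≤ d → d * d ≤ n → (d % 6 = 5 ∨ d % 6 = 1) → n % d ≠ 0 := by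
  induction i using is_prime_loop.induct (n := n) with
  | case1 i hg hm =>
    intro _ _ htrue
    rw [is_prime_loop, if_pos hg, if_pos hm] at htrue
    exact absurd htrue (by simp)
  | case2 i hg hm ih =>
    intro h5 h6 htrue d hid hdsq hdw
    rw [is_prime_loop, if_pos hg, if_neg hm] at htrue
    rcases not_or.mp hm with ⟨hm1, hm2⟩
    rw [PySem.Int.mod_eq_emod_of_pos (by omega : (0:Int) < i)] at hm1
    rw [PySem.Int.mod_eq_emod_of_pos (by omega : (0:Int) < i + 2)] at hm2
    by_cases hfar : i + 6 ≤ d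
    · exact ih (by omega) (by omega) htrue d hfar hdsq hdw
    · have hcases : d = i ∨ d = i + 2 := by omega
      rcases hcases with h | h
      · rw [h]; exact hm1
      · rw [h]; exact hm2
  | case3 i hg =>
    intro h5 _ _ d hid hdsq _
    exfalso
    have : i * i ≤ d * d := mul_le_mul hid hid (by omega) (by omega)
    omega

-- if n has no factor at all up to √n, A's wheel loop returns true
theorem is_prime_loop_of_no_factor (n i : Int) : 5 ≤ i →
    (∀ d, 2 ≤ d → d * d ≤ n → n % d ≠ 0) → is_prime_loop n i = true := by
  induction i using is_prime_loop.induct (n := n) with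
  | case1 i hg hm =>
    intro h5 hno
    exfalso
    rcases hm with hm | hm
    · rw [PySem.Int.mod_eq_emod_of_pos (by omega : (0:Int) < i)] at hm
      exact hno i (by omega) hg hm
    · rw [PySem.Int.mod_eq_emod_of_pos (by omega : (0:Int) < i + 2)] at hm
      by_cases hsq : (i + 2) * (i + 2) ≤ n
      · exact hno (i + 2) (by omega) hsq hm
      · obtain ⟨c, hc⟩ := Int.dvd_of_emod_eq_zero hm
        push Not at hsq
        have hipos : (0:Int) < i + 2 := by omega
        have hcpos : 0 < c := by nlinarith
        have hclt : c < i + 2 := by nlinarith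
        have h2c : 2 ≤ c := by
          by_contra hlt
          have hc1 : c = 1 := by omega
          rw [hc1, mul_one] at hc
          nlinarith
        have hcsq : c * c ≤ n := by nlinarith
        have hcd : n % c = 0 := Int.emod_eq_zero_of_dvd ⟨i + 2, by rw [hc]; ring⟩
        exact hno c h2c hcsq hcd
  | case2 i hg hm ih =>
    intro h5 hno
    rw [is_prime_loop, if_pos hg, if_neg hm]
    exact ih (by omega) hno
  | case3 i hg =>
    intro _ _
    rw [is_prime_loop, if_neg hg]

-- A's primality test, characterised by trial divisors up to √n
theorem is_prime_iff_no_factor (n : Int) :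
    is_prime n = true ↔ 2 ≤ n ∧ ∀ d : Int, 2 ≤ d → d * d ≤ n → n % d ≠ 0 := by
  unfold is_prime
  by_cases h1 : n ≤ 1
  · rw [if_pos h1]
    constructor
    · intro h; cases h
    · rintro ⟨h2, -⟩; omega
  · by_cases h3 : n ≤ 3
    · rw [if_neg h1, if_pos h3]
      constructor
      · intro _
        refine ⟨by omega, fun d hd hsq _ => ?_⟩
        have : 2 * 2 ≤ d * d := mul_le_mul hd hd (by omega) (by omega)
        omega
      · intro _; rfl
    · rw [if_neg h1, if_neg h3]
      rw [PySem.Int.mod_eq_emod_of_pos (a := n) (b := 2) (by norm_num),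
          PySem.Int.mod_eq_emod_of_pos (a := n) (b := 3) (by norm_num)]
      by_cases h2 : n % 2 = 0
      · rw [if_pos (Or.inl h2)]
        constructor
        · intro h; cases h
        · rintro ⟨-, hall⟩
          exact absurd h2 (hall 2 (by norm_num) (by omega))
      · by_cases h3m : n % 3 = 0
        · rw [if_pos (Or.inr h3m)]
          constructor
          · intro h; cases h
          · rintro ⟨-, hall⟩
            exact absurd h3m (hall 3 (by norm_num) (by omega))
        · rw [if_neg (by tauto)]
          constructor
          · intro hloop
            refine ⟨by omega, fun d hd hsq hm => ?_⟩
            by_cases hd2 : d % 2 = 0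
            · have : (2:Int) ∣ n :=
                dvd_trans (Int.dvd_of_emod_eq_zero hd2) (Int.dvd_of_emod_eq_zero hm)
              exact h2 (Int.emod_eq_zero_of_dvd this)
            · by_cases hd3 : d % 3 = 0
              · have : (3:Int) ∣ n :=
                  dvd_trans (Int.dvd_of_emod_eq_zero hd3) (Int.dvd_of_emod_eq_zero hm)
                exact h3m (Int.emod_eq_zero_of_dvd this)
              · have hw : d % 6 = 5 ∨ d % 6 = 1 := by omega
                have h5d : (5:Int) ≤ d := by omega
                exact is_prime_loop_no_wheel n 5 (by norm_num) (by norm_num) hloop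
                  d h5d hsq hw hm
          · rintro ⟨-, hall⟩
            exact is_prime_loop_of_no_factor n 5 (by norm_num) hall

-- the trial-divisor characterisation is primality of n.toNat
theorem no_factor_iff_prime (n : Int) (hn : 2 ≤ n) :
    (∀ d : Int, 2 ≤ d → d * d ≤ n → n % d ≠ 0) ↔ Nat.Prime n.toNat := by
  constructor
  · intro hall
    by_contra hnp
    have hpos : 0 < n.toNat := by omega
    have hne1 : n.toNat ≠ 1 := by omega
    have hp := Nat.minFac_prime hne1
    have hsq := Nat.minFac_sq_le_self hpos hnp
    have hdvd := Nat.minFac_dvd n.toNat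
    set p := n.toNat.minFac with hpdef
    have h2p : 2 ≤ (p : Int) := by exact_mod_cast hp.two_le
    have hsq' : (p : Int) * (p : Int) ≤ n := by
      have : (p * p : Nat) ≤ n.toNat := by nlinarith [hsq]
      have := (Int.ofNat_le.mpr this)
      push_cast at this ⊢
      omega
    have hdvd' : (p : Int) ∣ n := by
      have : (p : Int) ∣ (n.toNat : Int) := Int.natCast_dvd_natCast.mpr hdvd
      rwa [Int.toNat_of_nonneg (by omega)] at this
    exact hall p h2p hsq' (Int.emod_eq_zero_of_dvd hdvd')
  · intro hpr d hd hsq hm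
    have hdvd : d ∣ n := Int.dvd_of_emod_eq_zero hm
    have hdn : d.toNat ∣ n.toNat := by
      have h1 : d = (d.toNat : Int) := (Int.toNat_of_nonneg (by omega)).symm
      have h2 : n = (n.toNat : Int) := (Int.toNat_of_nonneg (by omega)).symm
      rw [h1, h2] at hdvd
      exact_mod_cast hdvd
    rcases hpr.eq_one_or_self_of_dvd d.toNat hdn with h | h
    · omega
    · have hdn' : d = n := by omega
      nlinarith

-- q % p != 0 test against a prime divisor, Nat side: a prime q has no divisor p with 2 ≤ p, p*p ≤ q
theorem prime_no_small_divisor (q p : Int) (hq : 2 ≤ q) (hpr : Nat.Prime q.toNat)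
    (hp : 2 ≤ p) (hsq : p * p ≤ q) : q % p ≠ 0 := by
  have := (no_factor_iff_prime q hq).mpr hpr
  exact this p hp hsq

-- foldl of 'sieve[j] = False' over indices all different from p leaves position p unchanged
theorem getD_foldl_set (js : List Int) (s : Array Bool) (p : Nat)
    (h : ∀ j ∈ js, j.toNat ≠ p) :
    (js.foldl (fun s j => s.setIfInBounds j.toNat false) s).getD p false = s.getD p false := by
  induction js generalizing s with
  | nil => rfl
  | cons j js ih =>
    simp only [List.foldl_cons]
    rw [ih _ (fun x hx => h x (List.mem_cons_of_mem _ hx))]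
    rw [Array.getD_eq_getD_getElem?, Array.getD_eq_getD_getElem?,
        Array.getElem?_setIfInBounds_ne (h j (List.mem_cons_self))]

-- the outer sieve loop only clears composite positions, so a prime position survives
theorem outer_keep (is : List Int) (s0 : Array Bool) (lim : Int) (p : Nat)
    (hp : Nat.Prime p) (h2 : ∀ i ∈ is, 2 ≤ i) :
    (is.foldl (fun s i => (PySem.List.pyRange (2 * i) lim i).foldl
        (fun s j => s.setIfInBounds j.toNat false) s) s0).getD p false = s0.getD p false := by
  induction is generalizing s0 with
  | nil => rfl
  | cons i is ih =>
    simp only [List.foldl_cons]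
    rw [ih _ (fun x hx => h2 x (List.mem_cons_of_mem _ hx))]
    apply getD_foldl_set
    intro j hj
    have hi2 : 2 ≤ i := h2 i List.mem_cons_self
    rcases (PySem.List.mem_pyRange_iff_of_pos (by omega : (0:Int) < i) j).mp hj with
      ⟨hlo, hhi, hdvd⟩
    have hdvdj : i ∣ j := by
      have h : i ∣ (j - 2 * i) + 2 * i := dvd_add hdvd ⟨2, by ring⟩
      simpa using h
    intro hjp
    have hj4 : 4 ≤ j := by nlinarith
    have hjcast : j = (p : Int) := by omega
    have hicast : i = ((i.toNat : Int)) := (Int.toNat_of_nonneg (by omega)).symm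
    have hidvd : i.toNat ∣ p := by
      rw [hjcast, hicast] at hdvdj
      exact_mod_cast hdvdj
    rcases hp.eq_one_or_self_of_dvd i.toNat hidvd with h | h
    · omega
    · -- then i = j, but j ≥ 2*i with i ≥ 2
      omega

-- sqrt_loop returns some limit ≥ start with m < (limit+1)²
theorem sqrt_loop_spec (m limit : Int) :
    limit ≤ sqrt_loop m limit ∧ m < (sqrt_loop m limit + 1) * (sqrt_loop m limit + 1) := by
  induction limit using sqrt_loop.induct (m := m) with
  | case1 l hg ih =>
    rw [sqrt_loop, if_pos hg]
    exact ⟨by omega, ih.2⟩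
  | case2 l hg =>
    rw [sqrt_loop, if_neg hg]
    exact ⟨le_refl l, by omega⟩

-- every element of the candidate list is at most py_max of it
theorem le_py_max (qs : List Int) : ∀ q ∈ qs, q ≤ py_max qs := by
  have hfn : (fun (m q : Int) => if m < q then q else m) = max := by
    funext m q
    rcases lt_trichotomy m q with h | h | h <;> simp [max_def] <;> omega
  unfold py_max
  rw [hfn]
  exact (PySem.List.le_foldl_max qs 1).2

-- a prime p with 2 ≤ p ≤ limit survives the sieve
theorem sieve_getD_prime (limit : Int) (p : Nat) (hp : Nat.Prime p)
    (_hlo : 2 ≤ (p : Int)) (hhi : (p : Int) ≤ limit) :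
    (build_sieve limit).getD p false = true := by
  unfold build_sieve
  rw [outer_keep _ _ _ _ hp (fun i hi => ((PySem.List.mem_pyRange_one).mp hi).1)]
  rw [Array.getD_eq_getD_getElem?, Array.getElem?_replicate]
  have : p < limit.toNat + 1 := by omega
  simp [this]

-- membership of a prime in B's sieved prime table
theorem mem_primes (limit : Int) (p : Nat) (hp : Nat.Prime p)
    (hlo : 2 ≤ (p : Int)) (hhi : (p : Int) ≤ limit) :
    ((p : Int)) ∈ (PySem.List.pyRange 2 (limit + 1) 1).filter
      (fun i => (build_sieve limit).getD i.toNat false) := by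
  rw [List.mem_filter]
  constructor
  · exact (PySem.List.mem_pyRange_one).mpr ⟨hlo, by omega⟩
  · simpa using sieve_getD_prime limit p hp hlo hhi

-- the heart: on any q bounded by m, B's prime-table divisibility test agrees with A's is_prime
theorem pred_eq_is_prime (m q : Int) (hqm : q ≤ m) :
    (decide (2 ≤ q) && (((PySem.List.pyRange 2 (sqrt_loop m 1 + 1) 1).filter
        (fun i => (build_sieve (sqrt_loop m 1)).getD i.toNat false)).all
      (fun p => !decide (p * p ≤ q) || decide (PySem.Int.mod q p ≠ 0)))) = is_prime q := by
  set limit := sqrt_loop m 1 with hlim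
  obtain ⟨hl1, hlsq⟩ := sqrt_loop_spec m 1
  rw [← hlim] at hl1 hlsq
  by_cases hq2 : 2 ≤ q
  · by_cases hpr : Nat.Prime q.toNat
    · -- both sides true
      have hA : is_prime q = true :=
        (is_prime_iff_no_factor q).mpr ⟨hq2, (no_factor_iff_prime q hq2).mpr hpr⟩
      rw [hA]
      simp only [Bool.and_eq_true, decide_eq_true_eq, List.all_eq_true]
      refine ⟨by simpa using hq2, fun p hpmem => ?_⟩
      rcases List.mem_filter.mp hpmem with ⟨hpr2, -⟩
      have hp2 : 2 ≤ p := ((PySem.List.mem_pyRange_one).mp hpr2).1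
      by_cases hsq : p * p ≤ q
      · have := prime_no_small_divisor q p hq2 hpr hp2 hsq
        rw [PySem.Int.mod_eq_emod_of_pos (by omega : (0:Int) < p)]
        simp [this]
      · simp [hsq]
    · -- both sides false: the minimal factor is in the table and divides q
      have hA : is_prime q = false := by
        cases hx : is_prime q with
        | false => rfl
        | true =>
          exact absurd ((no_factor_iff_prime q hq2).mp
            ((is_prime_iff_no_factor q).mp hx).2) hpr
      rw [hA]
      have hpos : 0 < q.toNat := by omega
      have hne1 : q.toNat ≠ 1 := by omega
      have hpfac := Nat.minFac_prime hne1
      have hsqn := Nat.minFac_sq_le_self hpos hpr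
      have hdvdn := Nat.minFac_dvd q.toNat
      set p := q.toNat.minFac with hpdef
      have hp2 : 2 ≤ (p : Int) := by exact_mod_cast hpfac.two_le
      have hsq : (p : Int) * (p : Int) ≤ q := by
        have h1 : (p * p : Nat) ≤ q.toNat := by nlinarith [hsqn]
        have h2 := (Int.ofNat_le.mpr h1)
        push_cast at h2 ⊢
        omega
      have hple : (p : Int) ≤ limit := by nlinarith
      have hdvd : (p : Int) ∣ q := by
        have h1 : (p : Int) ∣ (q.toNat : Int) := Int.natCast_dvd_natCast.mpr hdvdn
        rwa [Int.toNat_of_nonneg (by omega)] at h1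
      have hmem := mem_primes limit p hpfac hp2 hple
      simp only [Bool.and_eq_false_iff, List.all_eq_false]
      right
      refine ⟨(p : Int), hmem, ?_⟩
      rw [PySem.Int.mod_eq_emod_of_pos (by omega : (0:Int) < (p:Int))]
      simp [hsq, Int.emod_eq_zero_of_dvd hdvd]
  · have hA : is_prime q = false := by
      cases hx : is_prime q with
      | false => rfl
      | true => exact absurd ((is_prime_iff_no_factor q).mp hx).1 hq2
    rw [hA]
    simp [hq2]

-- A's nested append loops build exactly the is_prime filter of the flat candidate list
theorem a_list_eq (pv off : List Int) :
    pv.foldl (fun acc p =>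
      off.foldl (fun acc2 offset =>
        if is_prime (2 * p + offset) then acc2 ++ [2 * p + offset] else acc2) acc) []
      = (pv.flatMap (fun p => off.map (fun offset => 2 * p + offset))).filter is_prime := by
  have hstep : ∀ (p : Int) (acc : List Int),
      off.foldl (fun acc2 offset =>
        if is_prime (2 * p + offset) then acc2 ++ [2 * p + offset] else acc2) acc
        = acc ++ (off.map (fun offset => 2 * p + offset)).filter is_prime := by
    intro p acc
    rw [PySem.List.foldl_append_if (fun offset => is_prime (2 * p + offset))
          (fun offset => 2 * p + offset) off acc]
    rw [List.filter_map]
    rfl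
  have hfun : (fun (acc : List Int) p =>
      off.foldl (fun acc2 offset =>
        if is_prime (2 * p + offset) then acc2 ++ [2 * p + offset] else acc2) acc)
      = fun acc p => acc ++ (off.map (fun offset => 2 * p + offset)).filter is_prime :=
    funext fun acc => funext fun p => hstep p acc
  rw [hfun, PySem.List.foldl_append_eq_flatMap, List.nil_append, List.filter_flatMap]

-- ===== VERDICT (by name: the statement is the Claim_ definition above) =====
theorem analyze_offsets_spec : Claim_equal_analyze_offsets := by
  intro pv off _
  unfold Spec_analyze_offsets analyze_offsets analyze_offsets_alt
  simp only []
  rw [a_list_eq pv off]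
  set qs := pv.flatMap (fun p => off.map (fun offset => 2 * p + offset)) with hqs
  have hfilter : qs.filter is_prime = qs.filter (fun q =>
      decide (2 ≤ q) && (((PySem.List.pyRange 2 (sqrt_loop (py_max qs) 1 + 1) 1).filter
          (fun i => (build_sieve (sqrt_loop (py_max qs) 1)).getD i.toNat false)).all
        (fun p => !decide (p * p ≤ q) || decide (PySem.Int.mod q p ≠ 0)))) := by
    apply List.filter_congr
    intro q hq
    exact (pred_eq_is_prime (py_max qs) q (le_py_max qs q hq)).symm
  rw [hfilter]
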